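-- pv_equiv track=rewrite | github.com/AkashDeveloper8758/dsa_implementations | DSA_part_1/hashing/hashmap.py | intersectionOfUnsortedArr
-- ===== SOURCE A (Python) =====
-- def intersectionOfUnsortedArr(arr1,arr2):
--     freqMap = {i:1 for i in arr1}
--     for i in arr2:
--         if i in freqMap:
--             freqMap[i]+=1
--     count =0
--     for i in freqMap.values():
--         if i > 1:
--             count+=1
--     return count
-- ===== SOURCE B (Python) =====
-- def intersectionOfUnsortedArr(arr1, arr2):
--     a = sorted(arr1)
--     b = sorted(arr2)
--     i = j = count = 0
--     while i < len(a) and j < len(b):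
--         if a[i] < b[j]:
--             i += 1
--         elif b[j] < a[i]:
--             j += 1
--         else:
--             count += 1
--             v = a[i]
--             while i < len(a) and a[i] == v:
--                 i += 1
--             while j < len(b) and b[j] == v:
--                 j += 1
--     return count
-- ===== Notes on version B (the rewrite author's own statement) =====
-- stated objective: alternative
-- what changed: Replaces A's hash-based frequency map (build counts from arr1, increment over arr2, sweep values for >1) with a sort-based algorithm: sort both arrays and count common values with a two-pointer merge that skips duplicate runs.
import Mathlib
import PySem

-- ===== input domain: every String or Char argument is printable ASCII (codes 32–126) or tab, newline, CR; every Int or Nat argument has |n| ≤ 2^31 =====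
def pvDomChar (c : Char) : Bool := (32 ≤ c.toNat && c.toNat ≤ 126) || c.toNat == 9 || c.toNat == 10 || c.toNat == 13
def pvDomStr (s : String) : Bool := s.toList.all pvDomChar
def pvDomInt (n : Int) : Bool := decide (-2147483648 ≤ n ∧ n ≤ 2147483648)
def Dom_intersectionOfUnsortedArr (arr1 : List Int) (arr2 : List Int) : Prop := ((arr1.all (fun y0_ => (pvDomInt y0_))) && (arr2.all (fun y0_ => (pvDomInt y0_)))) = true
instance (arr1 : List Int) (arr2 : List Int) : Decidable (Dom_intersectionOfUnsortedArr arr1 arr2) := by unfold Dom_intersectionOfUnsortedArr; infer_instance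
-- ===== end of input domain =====

-- B replaces A's hash-based frequency map (build counts, increment over arr2, sweep for >1)
-- with a sort-based algorithm: sort both arrays and count common values by a two-pointer
-- merge that skips duplicate runs; same return value.

-- ===== PORT A =====
def intersectionOfUnsortedArr (arr1 : List Int) (arr2 : List Int) : Int :=
  -- freqMap = {i:1 for i in arr1}
  let freqMap : PySem.Dict Int Int :=
    arr1.foldl (fun d i => d.insert i 1) PySem.Dict.empty
  -- for i in arr2: if i in freqMap: freqMap[i] += 1
  let freqMap :=
    arr2.foldl (fun d i => if d.contains i then d.modify i 0 (fun v => v + 1) else d) freqMap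
  -- count values > 1
  freqMap.values.foldl (fun count i => if i > 1 then count + 1 else count) 0

-- ===== PORT B =====
-- the while loop of Source B: two sorted lists stand for a[i:], b[j:]; advancing an index = taking
-- the tail; the inner 'while a[i]==v'/'while b[j]==v' runs = dropWhile (· == v)
def pvMergeCount : List Int → List Int → Int
  | [], _ => 0
  | _ :: _, [] => 0
  | a :: as, b :: bs =>
    if a < b then pvMergeCount as (b :: bs)
    else if b < a then pvMergeCount (a :: as) bs
    else
      -- count += 1; v = a[i]; skip the run of v in both arrays (the current cells included)
      1 + pvMergeCount (as.dropWhile (· == a)) ((b :: bs).dropWhile (· == a))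
termination_by a b => a.length + b.length
decreasing_by
  · simp
  · simp
  · have h1 := List.length_dropWhile_le (fun x => x == a) as
    have h2 := List.length_dropWhile_le (fun x => x == a) (b :: bs)
    simp at h1 h2 ⊢; omega

def intersectionOfUnsortedArr_alt (arr1 : List Int) (arr2 : List Int) : Int :=
  pvMergeCount (PySem.List.sorted arr1 (fun x => x) false) (PySem.List.sorted arr2 (fun x => x) false)

-- ===== PRECONDITION & SPEC =====
def Spec_intersectionOfUnsortedArr (arr1 : List Int) (arr2 : List Int) (out : Int) : Prop := out = intersectionOfUnsortedArr_alt arr1 arr2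
instance (arr1 : List Int) (arr2 : List Int) (out : Int) : Decidable (Spec_intersectionOfUnsortedArr arr1 arr2 out) := by unfold Spec_intersectionOfUnsortedArr; infer_instance

-- ===== CLAIM (what is proved, stated in full; the proofs are below) =====
def Claim_equal_intersectionOfUnsortedArr : Prop := ∀ (arr1 : List Int) (arr2 : List Int), Dom_intersectionOfUnsortedArr arr1 arr2 → Spec_intersectionOfUnsortedArr arr1 arr2 (intersectionOfUnsortedArr arr1 arr2)

-- ===== LEMMAS AND PROOFS =====

-- ---- A-side: A computes |toFinset arr1 ∩ toFinset arr2| ----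

theorem getD_build_one (l : List Int) (d : PySem.Dict Int Int) (v : Int) :
    (l.foldl (fun d i => d.insert i 1) d).getD v 0 = if v ∈ l then 1 else d.getD v 0 := by
  induction l generalizing d with
  | nil => simp
  | cons a l ih =>
    simp only [List.foldl_cons, ih, PySem.Dict.getD_insert, List.mem_cons]
    by_cases hv : v ∈ l <;> by_cases hva : v = a <;> simp [hv, hva]

theorem keys_guarded (l : List Int) (d : PySem.Dict Int Int) :
    (l.foldl (fun d i => if d.contains i then d.modify i 0 (fun v => v + 1) else d) d).keys
      = d.keys := by
  induction l generalizing d with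
  | nil => rfl
  | cons a l ih =>
    simp only [List.foldl_cons]
    by_cases h : d.contains a = true
    · rw [if_pos h, ih, PySem.Dict.keys_modify, PySem.Dict.keys_insert_of_contains _ _ h]
    · rw [Bool.not_eq_true] at h
      rw [if_neg (by simp [h]), ih]

theorem getD_guarded (l : List Int) (d : PySem.Dict Int Int) (v : Int) :
    (l.foldl (fun d i => if d.contains i then d.modify i 0 (fun v => v + 1) else d) d).getD v 0
      = d.getD v 0 + (l.filter (fun i => d.contains i)).count v := by
  induction l generalizing d with
  | nil => simp
  | cons a l ih =>
    simp only [List.foldl_cons, List.filter_cons]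
    by_cases h : d.contains a = true
    · rw [if_pos h, if_pos h, ih]
      have hcont : ∀ j : Int, (d.modify a 0 (fun v => v + 1)).contains j = d.contains j := by
        intro j
        rw [PySem.Dict.contains_modify]
        by_cases hj : j = a
        · subst hj; simp [h]
        · simp [hj]
      have hfil : l.filter (fun i => (d.modify a 0 (fun v => v + 1)).contains i)
          = l.filter (fun i => d.contains i) := List.filter_congr (fun x _ => hcont x)
      rw [hfil, PySem.Dict.getD_modify, List.count_cons]
      by_cases hv : v = a
      · subst hv; simp; omega
      · simp [hv, beq_iff_eq]; omega
    · rw [Bool.not_eq_true] at h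
      rw [if_neg (by simp [h]), if_neg (by simp [h]), ih]

theorem foldl_count_gt_one (l : List Int) (c : Int) :
    l.foldl (fun count i => if i > 1 then count + 1 else count) c
      = c + (l.countP (fun i => decide (i > 1)) : Int) := by
  induction l generalizing c with
  | nil => simp
  | cons a l ih =>
    simp only [List.foldl_cons, List.countP_cons, ih]
    by_cases h : a > 1
    · simp [h]; ring
    · simp [h]

theorem a_eq_card (arr1 arr2 : List Int) :
    intersectionOfUnsortedArr arr1 arr2 = ((arr1.toFinset ∩ arr2.toFinset).card : Int) := by
  unfold intersectionOfUnsortedArr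
  set d0 : PySem.Dict Int Int := arr1.foldl (fun d i => d.insert i 1) PySem.Dict.empty with hd0
  set d1 := arr2.foldl (fun d i => if d.contains i then d.modify i 0 (fun v => v + 1) else d) d0
    with hd1
  have hkeys0 : d0.keys = PySem.Set.ofList arr1 := by
    rw [hd0, PySem.Dict.keys_foldl_insert]
    simp [PySem.Set.update_nil_left]
  have hkeys1 : d1.keys = PySem.Set.ofList arr1 := by
    rw [hd1, keys_guarded, hkeys0]
  have hnodup : d1.keys.Nodup := by rw [hkeys1]; exact PySem.Set.nodup_ofList arr1
  rw [foldl_count_gt_one, PySem.Dict.values_eq_map_keys d1 hnodup 0, List.countP_map, hkeys1,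
    zero_add]
  simp only [Function.comp_def]
  have hcnt : (PySem.Set.ofList arr1).countP (fun k => decide (d1.getD k 0 > 1))
      = (PySem.Set.ofList arr1).countP (fun k => decide (k ∈ arr2)) := by
    apply List.countP_congr
    intro k hk
    have hk1 : k ∈ arr1 := (PySem.Set.mem_ofList arr1 k).mp hk
    have hck : d0.contains k = true := by
      rw [PySem.Dict.contains_iff_mem_keys, hkeys0, PySem.Set.mem_ofList]; exact hk1
    have hval : d1.getD k 0 = 1 + arr2.count k := by
      rw [hd1, getD_guarded, hd0, getD_build_one, if_pos hk1, List.count_filter hck]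
    simp only [decide_eq_true_eq]
    rw [hval]
    constructor
    · intro h
      exact List.count_pos_iff.mp (by omega)
    · intro h
      have : 0 < arr2.count k := List.count_pos_iff.mpr h
      omega
  rw [hcnt]
  congr 1
  rw [List.countP_eq_length_filter]
  have hnd : ((PySem.Set.ofList arr1).filter (fun k => decide (k ∈ arr2))).Nodup :=
    (PySem.Set.nodup_ofList arr1).filter _
  rw [← List.toFinset_card_of_nodup hnd, List.toFinset_filter]
  congr 1
  ext x
  simp [PySem.Set.mem_ofList, Finset.mem_filter, List.mem_toFinset]

-- ---- B-side: pvMergeCount on sorted lists computes the same cardinal ----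

theorem not_mem_dropWhile_beq (x : Int) (l : List Int)
    (hp : l.Pairwise (· ≤ ·)) (hge : ∀ y ∈ l, x ≤ y) :
    x ∉ l.dropWhile (· == x) := by
  induction l with
  | nil => simp
  | cons a t ih =>
    by_cases hax : a = x
    · subst hax
      rw [List.dropWhile_cons_of_pos (by simp)]
      exact ih hp.of_cons (fun y hy => hge y (List.mem_cons_of_mem _ hy))
    · rw [List.dropWhile_cons_of_neg (by simp [hax])]
      intro hmem
      rcases List.mem_cons.mp hmem with h | h
      · exact hax h.symm
      · have h1 : a ≤ x := (List.pairwise_cons.mp hp).1 x h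
        have h2 : x ≤ a := hge a (List.mem_cons_self)
        exact hax (le_antisymm h1 h2)

theorem toFinset_cons_dropWhile (x : Int) (l : List Int) :
    (x :: l).toFinset = insert x (l.dropWhile (· == x)).toFinset := by
  induction l with
  | nil => simp
  | cons a t ih =>
    by_cases hax : a = x
    · subst hax
      rw [List.dropWhile_cons_of_pos (by simp)]
      simp only [List.toFinset_cons] at ih ⊢
      rw [Finset.insert_idem]
      exact ih
    · rw [List.dropWhile_cons_of_neg (by simp [hax])]
      simp

theorem mergeCount_eq_card (a b : List Int)
    (ha : a.Pairwise (· ≤ ·)) (hb : b.Pairwise (· ≤ ·)) :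
    pvMergeCount a b = ((a.toFinset ∩ b.toFinset).card : Int) := by
  fun_induction pvMergeCount a b with
  | case1 b => simp
  | case2 x xs => simp
  | case3 x xs y ys hxy ih =>
    -- x < y: x is below every element of y :: ys, so it cannot be common
    have hx_not : x ∉ (y :: ys).toFinset := by
      simp only [List.mem_toFinset]
      intro hmem
      rcases List.mem_cons.mp hmem with h | h
      · omega
      · have := (List.pairwise_cons.mp hb).1 x h
        omega
    rw [ih ha.of_cons hb]
    simp only [List.toFinset_cons]
    rw [Finset.insert_inter_of_notMem (by simpa using hx_not)]
  | case4 x xs y ys hxy hyx ih =>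
    have hy_not : y ∉ (x :: xs).toFinset := by
      simp only [List.mem_toFinset]
      intro hmem
      rcases List.mem_cons.mp hmem with h | h
      · omega
      · have := (List.pairwise_cons.mp ha).1 y h
        omega
    rw [ih ha hb.of_cons]
    simp only [List.toFinset_cons]
    rw [Finset.inter_insert_of_notMem (by simpa using hy_not)]
  | case5 x xs y ys hxy hyx ih =>
    have hxy' : x = y := by omega
    subst hxy'
    have hxs' : (xs.dropWhile (· == x)).Pairwise (· ≤ ·) :=
      List.Pairwise.sublist (List.dropWhile_sublist _) ha.of_cons
    have hys' : ((x :: ys).dropWhile (· == x)).Pairwise (· ≤ ·) :=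
      List.Pairwise.sublist (List.dropWhile_sublist _) hb
    rw [ih hxs' hys']
    have hys'' : ((x :: ys).dropWhile (· == x)) = ys.dropWhile (· == x) :=
      List.dropWhile_cons_of_pos (by simp)
    have hx1 : x ∉ (xs.dropWhile (· == x)).toFinset := by
      rw [List.mem_toFinset]
      exact not_mem_dropWhile_beq x xs ha.of_cons
        (fun z hz => (List.pairwise_cons.mp ha).1 z hz)
    have hx2 : x ∉ (ys.dropWhile (· == x)).toFinset := by
      rw [List.mem_toFinset]
      have := not_mem_dropWhile_beq x (x :: ys) hb
        (fun z hz => by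
          rcases List.mem_cons.mp hz with h | h
          · exact le_of_eq h.symm
          · exact (List.pairwise_cons.mp hb).1 z h)
      rw [hys''] at this
      exact this
    rw [hys'', toFinset_cons_dropWhile x xs, toFinset_cons_dropWhile x ys,
      Finset.insert_inter_of_mem (Finset.mem_insert_self x _),
      Finset.inter_insert_of_notMem hx1,
      Finset.card_insert_of_notMem (by simp only [Finset.mem_inter]; tauto)]
    push_cast
    ring

theorem alt_eq_card (arr1 arr2 : List Int) :
    intersectionOfUnsortedArr_alt arr1 arr2 = ((arr1.toFinset ∩ arr2.toFinset).card : Int) := by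
  unfold intersectionOfUnsortedArr_alt
  rw [mergeCount_eq_card _ _ (PySem.List.sorted_pairwise arr1 (fun x => x) )
    (PySem.List.sorted_pairwise arr2 (fun x => x)),
    List.toFinset_eq_of_perm _ _ (PySem.List.sorted_perm arr1 (fun x => x) false),
    List.toFinset_eq_of_perm _ _ (PySem.List.sorted_perm arr2 (fun x => x) false)]

-- ===== VERDICT (by name: the statement is the Claim_ definition above) =====
theorem intersectionOfUnsortedArr_spec : Claim_equal_intersectionOfUnsortedArr := by
  intro arr1 arr2 _
  unfold Spec_intersectionOfUnsortedArr
  rw [a_eq_card, alt_eq_card]
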